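-- pv_equiv track=rewrite | github.com/robertKrusekopf/AugmentTest | kegelmanager/backend/age_class_utils.py | get_allowed_altersklassen_for_age
-- ===== SOURCE A (Python) =====
-- def get_age_class_hierarchy():
--     """
--     Returns the age class hierarchy from youngest to oldest.
--
--     Returns:
--         list: List of tuples (altersklasse, min_age, max_age) ordered from youngest to oldest
--     """
--     return [
--         ('F', 7, 8),
--         ('E', 9, 10),
--         ('D', 11, 12),
--         ('C', 13, 14),
--         ('B', 15, 16),
--         ('A', 17, 18),
--         ('Herren', 18, 35),
--     ]
--
-- def get_minimum_altersklasse_for_age(age):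
--     """
--     Determines the minimum (youngest) age class a player of given age can be assigned to.
--
--     A player can only be assigned to teams whose age class is equal to or older than
--     the player's age class.
--
--     Args:
--         age: Player's age
--
--     Returns:
--         str: The minimum age class (e.g., 'D', 'C', 'B', 'A', 'Herren')
--              Returns 'Herren' if age is outside all youth ranges
--
--     Examples:
--         - Age 10 -> 'E' (can play in E, D, C, B, A, or Herren)
--         - Age 15 -> 'B' (can play in B, A, or Herren)
--         - Age 20 -> 'Herren' (can only play in Herren)
--     """
--     hierarchy = get_age_class_hierarchy()
--
--     # Find the age class that matches the player's age
--     for altersklasse, min_age, max_age in hierarchy: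
--         if min_age <= age <= max_age:
--             return altersklasse
--
--     # If age is outside all ranges, default to Herren
--     return 'Herren'
--
-- def get_allowed_altersklassen_for_age(age):
--     """
--     Returns all age classes a player of given age is allowed to play in.
--
--     Args:
--         age: Player's age
--
--     Returns:
--         list: List of allowed age class strings (e.g., ['E', 'D', 'C', 'B', 'A', 'Herren'])
--
--     Examples:
--         - Age 10 -> ['E', 'D', 'C', 'B', 'A', 'Herren']
--         - Age 15 -> ['B', 'A', 'Herren']
--         - Age 20 -> ['Herren']
--     """
--     min_class = get_minimum_altersklasse_for_age(age)
--     hierarchy = get_age_class_hierarchy()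
--
--     # Find the index of the minimum class
--     min_index = None
--     for i, (altersklasse, _, _) in enumerate(hierarchy):
--         if altersklasse == min_class:
--             min_index = i
--             break
--
--     if min_index is None:
--         return ['Herren']
--
--     # Return all classes from min_class onwards (older classes)
--     return [altersklasse for altersklasse, _, _ in hierarchy[min_index:]]
-- ===== SOURCE B (Python) =====
-- _LABELS = ['F', 'E', 'D', 'C', 'B', 'A', 'Herren']
--
-- def get_allowed_altersklassen_for_age(age):
--     # Closed form: youth classes cover ages 7..18 in two-year bands, so the
--     # first matching band's index is (age - 7) // 2; everyone else is Herren.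
--     if 7 <= age <= 18:
--         return _LABELS[(age - 7) // 2:]
--     return ['Herren']
-- ===== Notes on version B (the rewrite author's own statement) =====
-- stated objective: simpler
-- what changed: Replaces A's three passes (find min class by range scan, re-find its index, slice-and-project) with a closed-form arithmetic index into a label list for youth ages, else ['Herren'].
import Mathlib
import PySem

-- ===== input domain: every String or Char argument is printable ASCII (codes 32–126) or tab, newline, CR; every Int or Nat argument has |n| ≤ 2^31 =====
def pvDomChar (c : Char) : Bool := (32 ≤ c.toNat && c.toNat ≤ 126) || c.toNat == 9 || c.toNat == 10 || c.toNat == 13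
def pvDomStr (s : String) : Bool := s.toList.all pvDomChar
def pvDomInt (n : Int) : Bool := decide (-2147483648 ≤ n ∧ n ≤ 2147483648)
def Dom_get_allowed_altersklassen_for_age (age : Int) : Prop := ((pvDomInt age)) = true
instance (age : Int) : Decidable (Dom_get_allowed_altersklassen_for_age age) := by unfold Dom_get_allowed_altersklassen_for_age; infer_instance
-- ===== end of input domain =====

-- B replaces A's three hierarchy scans by a closed-form index (age-7)//2 into the label list (objective: simpler).

-- ===== PORT A =====
def pvHierarchy : List (String × Int × Int) :=
  [("F", 7, 8), ("E", 9, 10), ("D", 11, 12), ("C", 13, 14), ("B", 15, 16), ("A", 17, 18), ("Herren", 18, 35)]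

-- A's first loop: first class whose range contains age, default "Herren"
def pvMinClass (age : Int) : List (String × Int × Int) → String
  | [] => "Herren"
  | (ak, mn, mx) :: t => if mn ≤ age ∧ age ≤ mx then ak else pvMinClass age t

-- A's second loop: index of the first entry whose label equals min_class
def pvFindIdx (mc : String) : List (String × Int × Int) → Nat → Option Nat
  | [], _ => none
  | (ak, _, _) :: t, i => if ak = mc then some i else pvFindIdx mc t (i + 1)

def get_allowed_altersklassen_for_age (age : Int) : List String :=
  let min_class := pvMinClass age pvHierarchy
  match pvFindIdx min_class pvHierarchy 0 with
  | none => ["Herren"]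
  | some i => (PySem.List.slice pvHierarchy (some (i : Int)) none).map (·.1)

-- ===== PORT B =====
def pvLabels : List String := ["F", "E", "D", "C", "B", "A", "Herren"]

def get_allowed_altersklassen_for_age_alt (age : Int) : List String :=
  if 7 ≤ age ∧ age ≤ 18 then
    PySem.List.slice pvLabels (some (PySem.Int.floordiv (age - 7) 2)) none
  else ["Herren"]

-- ===== PRECONDITION & SPEC =====
def Spec_get_allowed_altersklassen_for_age (age : Int) (out : List String) : Prop := out = get_allowed_altersklassen_for_age_alt age
instance (age : Int) (out : List String) : Decidable (Spec_get_allowed_altersklassen_for_age age out) := by unfold Spec_get_allowed_altersklassen_for_age; infer_instance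

-- ===== CLAIM (what is proved, stated in full; the proofs are below) =====
def Claim_equal_get_allowed_altersklassen_for_age : Prop := ∀ (age : Int), Dom_get_allowed_altersklassen_for_age age → Spec_get_allowed_altersklassen_for_age age (get_allowed_altersklassen_for_age age)

-- ===== LEMMAS AND PROOFS =====

lemma minclass_out (age : Int) (h : age < 7 ∨ 35 < age) :
    pvMinClass age pvHierarchy = "Herren" := by
  simp only [pvHierarchy, pvMinClass]
  split_ifs <;> first | rfl | omega

lemma out_of_range (age : Int) (h : age < 7 ∨ 35 < age) :
    get_allowed_altersklassen_for_age age = get_allowed_altersklassen_for_age_alt age := by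
  unfold get_allowed_altersklassen_for_age get_allowed_altersklassen_for_age_alt
  rw [minclass_out age h, if_neg (by omega : ¬ (7 ≤ age ∧ age ≤ 18))]
  decide

-- ===== VERDICT (by name: the statement is the Claim_ definition above) =====
theorem get_allowed_altersklassen_for_age_spec : Claim_equal_get_allowed_altersklassen_for_age := by
  intro age _
  unfold Spec_get_allowed_altersklassen_for_age
  by_cases h : 7 ≤ age ∧ age ≤ 35
  · obtain ⟨h1, h2⟩ := h
    interval_cases age <;> decide
  · exact out_of_range age (by omega)
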